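-- pv_equiv track=rewrite | github.com/duziqi/daily-language-leaning | lark_client.py | _split_inline_code_spans
-- ===== SOURCE A (Python) =====
-- from typing import Dict, List, Optional, Tuple
--
-- def _split_inline_code_spans(text: str) -> List[Tuple[str, bool]]:
--     if "`" not in text:
--         return [(text, False)]
--     if text.count("`") % 2 != 0:
--         return [(text, False)]
--     parts = text.split("`")
--     spans: List[Tuple[str, bool]] = []
--     for idx, part in enumerate(parts):
--         if not part:
--             continue
--         spans.append((part, idx % 2 == 1))
--     return spans or [(text, False)]
-- ===== SOURCE B (Python) =====
-- from typing import List, Tuple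
--
-- def _split_inline_code_spans(text: str) -> List[Tuple[str, bool]]:
--     if "`" not in text:
--         return [(text, False)]
--     if text.count("`") % 2 != 0:
--         return [(text, False)]
--     spans: List[Tuple[str, bool]] = []
--     cur: List[str] = []
--     in_code = False
--     for ch in text:
--         if ch == "`":
--             if cur:
--                 spans.append(("".join(cur), in_code))
--             cur = []
--             in_code = not in_code
--         else:
--             cur.append(ch)
--     if cur:
--         spans.append(("".join(cur), in_code))
--     return spans or [(text, False)]
-- ===== Notes on version B (the rewrite author's own statement) =====
-- stated objective: alternative
-- what changed: Replaced split-on-delimiter followed by an enumerate/parity pass with a single character scan that maintains a current-span buffer and an in_code flag toggled at each delimiter character, flushing non-empty buffers.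
import Mathlib
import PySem

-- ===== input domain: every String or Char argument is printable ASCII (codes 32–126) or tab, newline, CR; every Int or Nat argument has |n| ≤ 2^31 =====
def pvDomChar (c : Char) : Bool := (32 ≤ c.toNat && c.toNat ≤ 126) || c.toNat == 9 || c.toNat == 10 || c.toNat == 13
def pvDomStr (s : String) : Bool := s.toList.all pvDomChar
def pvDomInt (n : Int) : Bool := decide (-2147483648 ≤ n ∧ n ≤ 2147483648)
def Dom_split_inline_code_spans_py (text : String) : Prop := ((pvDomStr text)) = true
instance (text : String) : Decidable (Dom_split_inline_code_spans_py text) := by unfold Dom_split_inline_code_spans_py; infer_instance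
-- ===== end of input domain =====

-- B replaces split-then-parity with a one-pass character scan (buffer + in_code flag); alternative decomposition, same cost.

-- ===== PORT A =====
def split_inline_code_spans_py (text : String) : List (String × Bool) :=
  if PySem.Str.isIn "`" text = false then [(text, false)]
  else if PySem.Str.count text "`" % 2 ≠ 0 then [(text, false)]
  else
    let parts := PySem.Chars.splitOn text.toList "`".toList
    let spans := (PySem.List.enumerate parts 0).foldl
      (fun spans p => if p.2 = [] then spans
        else spans ++ [(String.mk p.2, decide (PySem.Int.mod p.1 2 = 1))]) []
    if spans = [] then [(text, false)] else spans

-- ===== PORT B =====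
-- the character scan of Source B: cur is the pending buffer, inCode the backtick parity
def pvAltScan : List Char → List Char → Bool → List (String × Bool) → List (String × Bool)
  | [], cur, inCode, spans =>
      if cur = [] then spans else spans ++ [(String.mk cur, inCode)]
  | c :: rest, cur, inCode, spans =>
      if c = '`' then
        pvAltScan rest [] (!inCode)
          (if cur = [] then spans else spans ++ [(String.mk cur, inCode)])
      else pvAltScan rest (cur ++ [c]) inCode spans

def split_inline_code_spans_py_alt (text : String) : List (String × Bool) :=
  if PySem.Str.isIn "`" text = false then [(text, false)]
  else if PySem.Str.count text "`" % 2 ≠ 0 then [(text, false)]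
  else
    let spans := pvAltScan text.toList [] false []
    if spans = [] then [(text, false)] else spans

-- ===== PRECONDITION & SPEC =====
def Spec_split_inline_code_spans_py (text : String) (out : List (String × Bool)) : Prop := out = split_inline_code_spans_py_alt text
instance (text : String) (out : List (String × Bool)) : Decidable (Spec_split_inline_code_spans_py text out) := by unfold Spec_split_inline_code_spans_py; infer_instance

-- ===== CLAIM (what is proved, stated in full; the proofs are below) =====
def Claim_equal_split_inline_code_spans_py : Prop := ∀ (text : String), Dom_split_inline_code_spans_py text → Spec_split_inline_code_spans_py text (split_inline_code_spans_py text)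

-- ===== LEMMAS AND PROOFS =====

-- the pieces of cs split at each backtick, as a structural recursion
def pvSplitOne : List Char → List (List Char)
  | [] => [[]]
  | c :: rest =>
      if c = '`' then [] :: pvSplitOne rest
      else
        match pvSplitOne rest with
        | [] => [[c]]           -- unreachable: pvSplitOne is never []
        | h :: t => (c :: h) :: t

def pvModHead (f : List Char → List Char) : List (List Char) → List (List Char)
  | [] => []
  | h :: t => f h :: t

lemma pvSplitOne_ne_nil (cs : List Char) : pvSplitOne cs ≠ [] := by
  cases cs with
  | nil => simp [pvSplitOne]
  | cons c rest =>
    simp only [pvSplitOne]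
    split_ifs
    · simp
    · cases h : pvSplitOne rest <;> simp

lemma pvGo_eq (fuel : Nat) :
    ∀ (l cur : List Char) (res : List (List Char)), l.length < fuel →
      PySem.Chars.splitOn.go ['`'] fuel l cur res =
        res.reverse ++ pvModHead (cur.reverse ++ ·) (pvSplitOne l) := by
  induction fuel with
  | zero => intro l cur res h; omega
  | succ f ih =>
    intro l cur res h
    cases l with
    | nil =>
      simp [PySem.Chars.splitOn.go, pvSplitOne, pvModHead]
    | cons c rest =>
      rw [PySem.Chars.splitOn.go]
      by_cases hc : c = '`'
      · have hpre : List.isPrefixOf ['`'] (c :: rest) = true := by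
          simp [List.isPrefixOf, hc]
        rw [if_pos hpre]
        have hrest : rest.length < f := by simpa using Nat.lt_of_succ_lt_succ h
        rw [show List.drop (['`'].length) (c :: rest) = rest from by simp]
        rw [ih rest [] (cur.reverse :: res) hrest]
        cases hs : pvSplitOne rest with
        | nil => exact absurd hs (pvSplitOne_ne_nil _)
        | cons a t =>
          simp [pvSplitOne, hc, hs, pvModHead]
      · have hpre : List.isPrefixOf ['`'] (c :: rest) = false := by
          simp [List.isPrefixOf]
          exact fun hh => hc hh.symm
        rw [if_neg (by simp [hpre])]
        have hrest : rest.length < f := by simpa using Nat.lt_of_succ_lt_succ h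
        rw [ih rest (c :: cur) res hrest]
        cases hs : pvSplitOne rest with
        | nil => exact absurd hs (pvSplitOne_ne_nil _)
        | cons a t =>
          simp [pvSplitOne, hc, hs, pvModHead]

lemma pvSplitOn_eq (cs : List Char) :
    PySem.Chars.splitOn cs ['`'] = pvSplitOne cs := by
  rw [PySem.Chars.splitOn, pvGo_eq (cs.length + 1) cs [] [] (Nat.lt_succ_self _)]
  cases hs : pvSplitOne cs with
  | nil => exact absurd hs (pvSplitOne_ne_nil _)
  | cons a t => simp [pvModHead]

-- spans emitted from the split pieces starting at parity b
def pvEmit : List (List Char) → Bool → List (String × Bool)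
  | [], _ => []
  | p :: ps, b => (if p = [] then [] else [(String.mk p, b)]) ++ pvEmit ps (!b)

lemma pvAltScan_eq (cs : List Char) :
    ∀ (cur : List Char) (b : Bool) (spans : List (String × Bool)),
      pvAltScan cs cur b spans = spans ++ pvEmit (pvModHead (cur ++ ·) (pvSplitOne cs)) b := by
  induction cs with
  | nil =>
    intro cur b spans
    simp only [pvAltScan, pvSplitOne, pvModHead, pvEmit]
    split_ifs with h <;> simp_all [List.append_nil]
  | cons c rest ih =>
    intro cur b spans
    simp only [pvAltScan, pvSplitOne]
    by_cases hc : c = '`'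
    · simp only [if_pos hc, ih]
      cases h : pvSplitOne rest with
      | nil => exact absurd h (pvSplitOne_ne_nil _)
      | cons a t =>
        simp only [pvModHead, pvEmit, List.nil_append]
        split_ifs with hcur <;> simp_all [List.append_nil]
    · simp only [if_neg hc, ih]
      cases h : pvSplitOne rest with
      | nil => exact absurd h (pvSplitOne_ne_nil _)
      | cons a t => simp [pvModHead, pvEmit, List.append_assoc]

lemma pvFold_eq (ps : List (List Char)) :
    ∀ (k : Nat) (acc : List (String × Bool)),
      (PySem.List.enumerate ps (k : Int)).foldl
        (fun spans p => if p.2 = [] then spans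
          else spans ++ [(String.mk p.2, decide (PySem.Int.mod p.1 2 = 1))]) acc
      = acc ++ pvEmit ps (k % 2 == 1) := by
  induction ps with
  | nil => intro k acc; simp [pvEmit, PySem.List.enumerate]
  | cons p t ih =>
    intro k acc
    rw [PySem.List.enumerate_cons]
    have hcast : ((k : Int) + 1) = ((k + 1 : Nat) : Int) := by push_cast; ring
    have hpar : decide (PySem.Int.mod (k : Int) 2 = 1) = (k % 2 == 1) := by
      have : PySem.Int.mod (k : Int) 2 = ((k % 2 : Nat) : Int) := by
        simp [PySem.Int.mod, Int.fmod_eq_emod]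
      rw [this]
      rcases Nat.mod_two_eq_zero_or_one k with h | h <;> simp [h]
    have hflip : ((k + 1) % 2 == 1) = !(k % 2 == 1) := by
      rcases Nat.mod_two_eq_zero_or_one k with h | h <;> simp [Nat.add_mod, h]
    simp only [List.foldl_cons, pvEmit, hpar]
    rw [hcast, ih, hflip]
    split_ifs with hp <;> simp

-- ===== VERDICT (by name: the statement is the Claim_ definition above) =====
theorem split_inline_code_spans_py_spec : Claim_equal_split_inline_code_spans_py := by
  intro text _
  unfold Spec_split_inline_code_spans_py split_inline_code_spans_py split_inline_code_spans_py_alt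
  split_ifs with h1 h2
  · rfl
  · rfl
  · have hs : PySem.Chars.splitOn text.toList "`".toList = pvSplitOne text.toList := by
      simpa using pvSplitOn_eq text.toList
    have hA := pvFold_eq (pvSplitOne text.toList) 0 []
    simp only [Nat.cast_zero] at hA
    have hB := pvAltScan_eq text.toList [] false []
    have hmod : pvModHead ([] ++ ·) (pvSplitOne text.toList) = pvSplitOne text.toList := by
      cases h : pvSplitOne text.toList with
      | nil => exact absurd h (pvSplitOne_ne_nil _)
      | cons a t => simp [pvModHead]
    rw [hmod] at hB
    simp only [hs, hA, hB, List.nil_append, Nat.zero_mod]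
    rfl
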